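-- pv_equiv track=rewrite | github.com/bioinfoUQAM/mirLibSpark | src/utils.py | trim_adapter__
-- ===== SOURCE A (Python) =====
-- def trim_adapter__ (seq, ad):
--   while len(ad) > 0:
--     len_ad = len(ad)
--     if seq[-len_ad:] == ad:
--       seq = seq[:-len_ad]
--       return seq
--     ad = ad[:-1]
--   return seq
-- ===== SOURCE B (Python) =====
-- def trim_adapter__(seq, ad):
--     # KMP: run the prefix-automaton of ad over seq; the final state is the
--     # longest k with seq.endswith(ad[:k]); trim that many characters.
--     m = len(ad)
--     if m == 0:
--         return seq
--     f = [0] * m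
--     k = 0
--     for i in range(1, m):
--         while k > 0 and ad[i] != ad[k]:
--             k = f[k - 1]
--         if ad[i] == ad[k]:
--             k += 1
--         f[i] = k
--     j = 0
--     for c in seq:
--         while j > 0 and (j == m or c != ad[j]):
--             j = f[j - 1]
--         if j < m and c == ad[j]:
--             j += 1
--     return seq[:len(seq) - j]
-- ===== Notes on version B (the rewrite author's own statement) =====
-- stated objective: faster
-- what changed: A repeatedly compares seq's suffix against every shortening of ad (descending slice-and-compare, quadratic); B builds the KMP failure table of ad and runs the prefix automaton once over seq, whose final state is the longest adapter-prefix that is a suffix of seq.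
import Mathlib
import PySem

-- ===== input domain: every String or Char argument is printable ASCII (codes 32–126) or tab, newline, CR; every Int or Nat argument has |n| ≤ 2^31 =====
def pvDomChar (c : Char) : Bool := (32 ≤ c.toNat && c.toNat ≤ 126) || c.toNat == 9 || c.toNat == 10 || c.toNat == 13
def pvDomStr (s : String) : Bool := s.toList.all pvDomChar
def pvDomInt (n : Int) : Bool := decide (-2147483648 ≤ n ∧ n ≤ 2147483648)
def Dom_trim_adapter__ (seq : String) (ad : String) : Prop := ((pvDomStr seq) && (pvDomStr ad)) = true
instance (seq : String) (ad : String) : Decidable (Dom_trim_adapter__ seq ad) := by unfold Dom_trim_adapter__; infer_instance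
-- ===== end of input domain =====

-- B replaces A's quadratic descending slice-and-compare loop by a KMP prefix automaton:
-- build the failure table of ad, run the automaton once over seq; the final state is the
-- longest k with seq.endswith(ad[:k]). Objective: faster (linear vs quadratic).

-- ===== PORT A =====
-- while len(ad) > 0: if seq[-len(ad):] == ad: return seq[:-len(ad)]; ad = ad[:-1]
def pvTrimLoopA (seq : String) (ad : String) : String :=
  if h : 0 < PySem.Str.len ad then
    if PySem.Str.slice seq (some (-(PySem.Str.len ad))) none = ad then
      PySem.Str.slice seq none (some (-(PySem.Str.len ad)))
    else pvTrimLoopA seq (PySem.Str.slice ad none (some (-1)))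
  else seq
termination_by (PySem.Str.len ad).toNat
decreasing_by
  simp only [PySem.Str.len_eq] at h ⊢
  rw [PySem.Str.slice_to_neg_one, List.length_dropLast]
  omega

def trim_adapter__ (seq : String) (ad : String) : String := pvTrimLoopA seq ad

-- ===== PORT B =====
-- the fallback while-loop of KMP: while v>0 and not stop(v): v = f[v-1].
-- ('min … v' is only a totality guard: the tables built below always satisfy f[v-1] ≤ v-1)
def pvChainFind (f : List Nat) (stop : Nat → Bool) : Nat → Nat
  | 0 => 0
  | v + 1 => if stop (v + 1) then v + 1 else pvChainFind f stop (min (f.getD v 0) v)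
termination_by v => v
decreasing_by exact Nat.lt_succ_of_le (min_le_right _ _)

-- one scan step: while j>0 and (j==m or c != ad[j]): j = f[j-1];  if j<m and c==ad[j]: j+=1
def pvStep (a : List Char) (f : List Nat) (j : Nat) (c : Char) : Nat :=
  let j1 := pvChainFind f (fun v => decide (v ≠ a.length) && (a.getD v ' ' == c)) j
  if decide (j1 < a.length) && (a.getD j1 ' ' == c) then j1 + 1 else j1

-- for i in range(1, m): while k>0 and ad[i]!=ad[k]: k=f[k-1]; if ad[i]==ad[k]: k+=1; f[i]=k
-- (python pre-allocates f=[0]*m and assigns f[i] in order; building by append is the same table)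
def pvBuildF (a : List Char) (i : Nat) (f : List Nat) (k : Nat) : List Nat :=
  if h : i < a.length then
    let c := a.getD i ' '
    let k1 := pvChainFind f (fun v => a.getD v ' ' == c) k
    let k2 := if a.getD k1 ' ' == c then k1 + 1 else k1
    pvBuildF a (i + 1) (f ++ [k2]) k2
  else f
termination_by a.length - i

def trim_adapter___alt (seq : String) (ad : String) : String :=
  let a := ad.toList
  if a.length = 0 then seq
  else
    let f := pvBuildF a 1 [0] 0
    let j := seq.toList.foldl (pvStep a f) 0
    PySem.Str.slice seq none (some (PySem.Str.len seq - (j : Int)))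

-- ===== PRECONDITION & SPEC =====
def Spec_trim_adapter__ (seq : String) (ad : String) (out : String) : Prop := out = trim_adapter___alt seq ad
instance (seq : String) (ad : String) (out : String) : Decidable (Spec_trim_adapter__ seq ad out) := by unfold Spec_trim_adapter__; infer_instance

-- ===== CLAIM (what is proved, stated in full; the proofs are below) =====
def Claim_equal_trim_adapter__ : Prop := ∀ (seq : String) (ad : String), Dom_trim_adapter__ seq ad → Spec_trim_adapter__ seq ad (trim_adapter__ seq ad)

-- ===== LEMMAS AND PROOFS =====

-- the largest k ≤ n with a.take k a suffix of t
def pvG (a : List Char) (n : Nat) (t : List Char) : Nat :=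
  Nat.findGreatest (fun k => a.take k <:+ t) n

-- the table-correctness invariant: f[i] = longest proper border of a.take (i+1)
def pvFok (a : List Char) (f : List Nat) : Prop :=
  ∀ i, i < f.length → f.getD i 0 = pvG a i (a.take (i + 1))

lemma pvG_le (a : List Char) (n : Nat) (t : List Char) : pvG a n t ≤ n :=
  Nat.findGreatest_le n

lemma pvG_suffix (a : List Char) (n : Nat) (t : List Char) : a.take (pvG a n t) <:+ t := by
  rcases Nat.eq_zero_or_pos (pvG a n t) with h0 | hpos
  · rw [h0]; simp
  · have := (Nat.findGreatest_eq_iff.1 (rfl : pvG a n t = Nat.findGreatest _ n)).2.1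
    exact this (by omega)

lemma pvG_max (a : List Char) (n : Nat) (t : List Char) (u : Nat) (hu : a.take u <:+ t)
    (hun : u ≤ n) : u ≤ pvG a n t :=
  Nat.le_findGreatest hun hu

lemma pvSuffix_of_suffix_le {α : Type} (u v t : List α) (hu : u <:+ t) (hv : v <:+ t)
    (h : u.length ≤ v.length) : u <:+ v := by
  rw [← List.reverse_prefix] at hu hv ⊢
  exact List.prefix_of_prefix_length_le hu hv (by simpa using h)

-- the special case used everywhere: a.take u and a.take j suffixes of t, u ≤ j ≤ a.length
lemma pvTake_suffix_take (a t : List Char) (u j : Nat) (hu : a.take u <:+ t)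
    (hj : a.take j <:+ t) (huj : u ≤ j) (hja : j ≤ a.length) : a.take u <:+ a.take j := by
  apply pvSuffix_of_suffix_le _ _ _ hu hj
  simp only [List.length_take]
  omega

lemma pvConcat_suffix (u t : List Char) (x c : Char) :
    u ++ [x] <:+ t ++ [c] ↔ x = c ∧ u <:+ t := by
  rw [← List.reverse_prefix, List.reverse_append, List.reverse_append]
  simp only [List.reverse_singleton, List.singleton_append, List.cons_prefix_cons,
    List.reverse_prefix]

lemma pvTake_succ_concat (a : List Char) (i : Nat) (h : i < a.length) :
    a.take (i + 1) = a.take i ++ [a.getD i ' '] := by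
  rw [List.take_add_one, List.getD_eq_getElem?_getD, List.getElem?_eq_getElem h]
  rfl

lemma pvChainFind_le (f : List Nat) (st : Nat → Bool) : ∀ j, pvChainFind f st j ≤ j := by
  intro j
  induction j using Nat.strong_induction_on with
  | _ j ih =>
    cases j with
    | zero => simp [pvChainFind]
    | succ v =>
      rw [pvChainFind]
      split_ifs with h
      · exact le_rfl
      · exact le_trans (ih _ (Nat.lt_succ_of_le (min_le_right _ _)))
          (Nat.le_succ_of_le (min_le_right _ _))

lemma pvChain_spec (a : List Char) (f : List Nat) (st : Nat → Bool) (hf : pvFok a f) :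
    ∀ j, j ≤ a.length → j ≤ f.length →
      pvChainFind f st j
        = Nat.findGreatest (fun v => a.take v <:+ a.take j ∧ st v = true) j := by
  intro j
  induction j using Nat.strong_induction_on with
  | _ j ih =>
    intro hj hjf
    cases j with
    | zero => simp [pvChainFind]
    | succ v =>
      rw [pvChainFind, Nat.findGreatest_succ]
      by_cases hst : st (v + 1) = true
      · rw [if_pos hst, if_pos ⟨List.suffix_refl _, hst⟩]
      · rw [if_neg hst, if_neg (by intro h; exact hst h.2)]
        have hvf : v < f.length := hjf
        have hbG : f.getD v 0 = pvG a v (a.take (v + 1)) := hf v hvf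
        have hble : f.getD v 0 ≤ v := hbG ▸ pvG_le a v (a.take (v + 1))
        rw [min_eq_left hble]
        set b := f.getD v 0 with hbdef
        rw [ih b (Nat.lt_succ_of_le hble) (by omega) (by omega)]
        -- b is the longest proper border of a.take (v+1)
        have hbs : a.take b <:+ a.take (v + 1) := hbG ▸ pvG_suffix a v (a.take (v + 1))
        have hbmax : ∀ w, w ≤ v → a.take w <:+ a.take (v + 1) → w ≤ b := by
          intro w hwv hws
          rw [hbG]
          exact pvG_max _ _ _ _ hws hwv
        -- the two findGreatest values agree
        apply le_antisymm
        · rcases Nat.eq_zero_or_pos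
            (Nat.findGreatest (fun w => a.take w <:+ a.take b ∧ st w = true) b) with h0 | hpos
          · rw [h0]; exact Nat.zero_le _
          · have hys := (Nat.findGreatest_eq_iff.1
              (rfl : Nat.findGreatest (fun w => a.take w <:+ a.take b ∧ st w = true) b = _)).2.1
              (Nat.pos_iff_ne_zero.1 hpos)
            have hyb : Nat.findGreatest (fun w => a.take w <:+ a.take b ∧ st w = true) b ≤ b :=
              Nat.findGreatest_le b
            exact Nat.le_findGreatest (by omega) ⟨hys.1.trans hbs, hys.2⟩
        · rcases Nat.eq_zero_or_pos
            (Nat.findGreatest (fun w => a.take w <:+ a.take (v + 1) ∧ st w = true) v) with h0 | hpos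
          · rw [h0]; exact Nat.zero_le _
          · have hxs := (Nat.findGreatest_eq_iff.1
              (rfl : Nat.findGreatest (fun w => a.take w <:+ a.take (v + 1) ∧ st w = true) v = _)).2.1
              (Nat.pos_iff_ne_zero.1 hpos)
            have hxv : Nat.findGreatest (fun w => a.take w <:+ a.take (v + 1) ∧ st w = true) v ≤ v :=
              Nat.findGreatest_le v
            have hxb := hbmax _ hxv hxs.1
            exact Nat.le_findGreatest hxb
              ⟨pvTake_suffix_take a (a.take (v + 1)) _ b hxs.1 hbs hxb (by omega), hxs.2⟩

-- one automaton step from the exact state j = pvG a n t computes pvG a n' (t ++ [c]);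
-- r is the port's expression for the post-loop increment
lemma pvStep_spec (a : List Char) (f : List Nat) (st : Nat → Bool) (t : List Char) (c : Char)
    (n n' j r : Nat) (hf : pvFok a f) (hjf : j ≤ f.length)
    (hn' : n' ≤ a.length) (hn : n ≤ a.length)
    (hcase : n' = n + 1 ∨ (n' = a.length ∧ n = a.length))
    (hj : j = pvG a n t)
    (hts : a.take j <:+ t)
    (hstop : ∀ v, v ≤ j → (st v = true ↔ (v < a.length ∧ a.getD v ' ' = c)))
    (hr1 : pvChainFind f st j < a.length ∧ a.getD (pvChainFind f st j) ' ' = c →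
       r = pvChainFind f st j + 1)
    (hr2 : ¬(pvChainFind f st j < a.length ∧ a.getD (pvChainFind f st j) ' ' = c) →
       r = pvChainFind f st j) :
    r = pvG a n' (t ++ [c]) := by
  have hjn : j ≤ n := hj ▸ pvG_le a n t
  have hja : j ≤ a.length := le_trans hjn hn
  have hchain := pvChain_spec a f st hf j hja hjf
  set j1 := pvChainFind f st j with hj1def
  have hj1j : j1 ≤ j := pvChainFind_le f st j
  have hQ : j1 ≠ 0 → a.take j1 <:+ a.take j ∧ st j1 = true := by
    intro h0
    exact (Nat.findGreatest_eq_iff.1 hchain.symm).2.1 h0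
  have hj1t : a.take j1 <:+ t := by
    rcases Nat.eq_zero_or_pos j1 with h0 | hpos
    · rw [h0]; simp
    · exact (hQ (by omega)).1.trans hts
  -- every suffix-match of t++[c] of positive length u comes from a stopping point u-1 ≤ j1
  have hkey : ∀ u, 0 < u → u ≤ n' → a.take u <:+ t ++ [c] →
      u - 1 ≤ j1 ∧ u - 1 < a.length ∧ a.getD (u - 1) ' ' = c := by
    intro u hu0 hun' hus
    have hn'n : n' ≤ n + 1 := by rcases hcase with h | ⟨h1, h2⟩ <;> omega
    have hua : u ≤ a.length := le_trans hun' hn'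
    have hu1a : u - 1 < a.length := by omega
    obtain ⟨w, rfl⟩ : ∃ w, u = w + 1 := ⟨u - 1, by omega⟩
    simp only [Nat.add_sub_cancel]
    rw [pvTake_succ_concat a _ (by omega), pvConcat_suffix] at hus
    obtain ⟨hcu, hsu⟩ := hus
    have hwn : w ≤ n := by omega
    have hwj : w ≤ j := hj ▸ pvG_max a n t w hsu hwn
    have hQu : a.take w <:+ a.take j ∧ st w = true := by
      refine ⟨pvTake_suffix_take a t w j hsu hts hwj hja, ?_⟩
      rw [hstop w hwj]
      exact ⟨by omega, hcu⟩
    exact ⟨hchain ▸ Nat.le_findGreatest hwj hQu, by omega, hcu⟩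
  by_cases hcc : j1 < a.length ∧ a.getD j1 ' ' = c
  · rw [hr1 hcc]
    have hext : a.take (j1 + 1) <:+ t ++ [c] := by
      rw [pvTake_succ_concat a j1 hcc.1, hcc.2]
      exact (pvConcat_suffix _ _ _ _).2 ⟨rfl, hj1t⟩
    have hub : j1 + 1 ≤ n' := by
      rcases hcase with h | ⟨h1, h2⟩
      · omega
      · omega
    apply le_antisymm
    · exact pvG_max a n' (t ++ [c]) (j1 + 1) hext hub
    · set g := pvG a n' (t ++ [c]) with hg
      rcases Nat.eq_zero_or_pos g with h0 | hpos
      · omega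
      · have := hkey g hpos (pvG_le a n' (t ++ [c])) (pvG_suffix a n' (t ++ [c]))
        omega
  · rw [hr2 hcc]
    have hj10 : j1 = 0 := by
      rcases Nat.eq_zero_or_pos j1 with h0 | hpos
      · exact h0
      · have := hQ (by omega)
        rw [hstop j1 hj1j] at this
        exact absurd this.2 hcc
    rw [hj10]
    symm
    rw [pvG, Nat.findGreatest_eq_zero_iff]
    intro u hu0 hun' hus
    have := hkey u hu0 hun' hus
    rw [hj10] at this
    have hu1 : u = 1 := by omega
    rw [hj10] at hcc
    simp only [hu1, Nat.sub_self] at this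
    exact hcc ⟨this.2.1, this.2.2⟩

lemma pvScan_spec (a : List Char) (f : List Nat) (hf : pvFok a f) (hfl : f.length = a.length) :
    ∀ (l t : List Char) (j : Nat), j = pvG a a.length t →
      List.foldl (pvStep a f) j l = pvG a a.length (t ++ l) := by
  intro l
  induction l with
  | nil => intro t j hj; simpa using hj
  | cons c l ih =>
    intro t j hj
    rw [List.foldl_cons]
    have hstep : pvStep a f j c = pvG a a.length (t ++ [c]) := by
      apply pvStep_spec a f (fun v => decide (v ≠ a.length) && (a.getD v ' ' == c)) t c
        a.length a.length j (pvStep a f j c) hf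
        (by rw [hfl]; exact hj ▸ pvG_le a a.length t) le_rfl le_rfl
        (Or.inr ⟨rfl, rfl⟩) hj (hj ▸ pvG_suffix a a.length t)
      · intro v hv
        have hva : v ≤ a.length := le_trans hv (hj ▸ pvG_le a a.length t)
        simp only [Bool.and_eq_true, decide_eq_true_eq, beq_iff_eq]
        constructor
        · intro h; exact ⟨by omega, h.2⟩
        · intro h; exact ⟨by omega, h.2⟩
      · intro h
        simp only [pvStep]
        rw [if_pos (by simp only [Bool.and_eq_true, decide_eq_true_eq, beq_iff_eq]; exact h)]
      · intro h
        simp only [pvStep]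
        rw [if_neg (by simp only [Bool.and_eq_true, decide_eq_true_eq, beq_iff_eq]; exact h)]
    rw [hstep, ih (t ++ [c]) _ rfl]
    congr 1
    simp

lemma pvBuild_spec (a : List Char) :
    ∀ (d i : Nat) (f : List Nat) (k : Nat), a.length - i = d → 1 ≤ i → i ≤ a.length →
      f.length = i → pvFok a f → k = f.getD (i - 1) 0 →
      (pvBuildF a i f k).length = a.length ∧ pvFok a (pvBuildF a i f k) := by
  intro d
  induction d with
  | zero =>
    intro i f k hd h1 hi hfl hFok hk
    have : ¬ i < a.length := by omega
    rw [pvBuildF, dif_neg this]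
    exact ⟨by omega, hFok⟩
  | succ d ih =>
    intro i f k hd h1 hi hfl hFok hk
    have hia : i < a.length := by omega
    rw [pvBuildF, dif_pos hia]
    set c := a.getD i ' ' with hc
    set k1 := pvChainFind f (fun v => a.getD v ' ' == c) k with hk1
    set k2 := (if a.getD k1 ' ' == c then k1 + 1 else k1 : Nat) with hk2
    have hkG : k = pvG a (i - 1) (a.take i) := by
      have h1 := hFok (i - 1) (by omega)
      have hii : i - 1 + 1 = i := by omega
      rw [hii] at h1
      rw [hk, h1]
    have hkle : k ≤ i - 1 := hkG ▸ pvG_le a (i - 1) (a.take i)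
    have hk1k : k1 ≤ k := pvChainFind_le _ _ k
    have hstep : k2 = pvG a i (a.take i ++ [c]) := by
      apply pvStep_spec a f (fun v => a.getD v ' ' == c) (a.take i) c (i - 1) i k k2 hFok (by omega)
        (by omega) (by omega) (Or.inl (by omega)) hkG
        (hkG ▸ pvG_suffix a (i - 1) (a.take i))
      · intro v hv
        simp only [beq_iff_eq]
        constructor
        · intro h; exact ⟨by omega, h⟩
        · intro h; exact h.2
      · intro h
        rw [hk2, if_pos (by simp only [beq_iff_eq]; exact h.2)]
      · intro h
        have hlt : k1 < a.length := by omega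
        rw [hk2, if_neg (by simp only [beq_iff_eq]; intro hcc; exact h ⟨hlt, hcc⟩)]
    have hk2G : k2 = pvG a i (a.take (i + 1)) := by
      rw [hstep, ← pvTake_succ_concat a i hia]
    have hFok' : pvFok a (f ++ [k2]) := by
      intro t ht
      simp only [List.length_append, List.length_singleton] at ht
      rcases Nat.lt_or_ge t f.length with hlt | hge
      · rw [List.getD_append _ _ _ _ hlt]
        exact hFok t hlt
      · have hti : t = i := by omega
        subst hti
        have : (f ++ [k2]).getD t 0 = k2 := by
          rw [List.getD_eq_getElem?_getD, List.getElem?_append_right (by omega)]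
          simp [hfl]
        rw [this, hk2G]
    apply ih (i + 1) (f ++ [k2]) k2 (by omega) (by omega) (by omega)
      (by simp [hfl]) hFok'
    rw [List.getD_eq_getElem?_getD, List.getElem?_append_right (by omega)]
    simp [hfl]

-- ascending characterisation of A's descending search
def pvBestUp (s a : List Char) : Nat → Int
  | 0 => 0
  | j + 1 => if PySem.Chars.endswith s (a.take (j + 1)) then ((j + 1 : Nat) : Int) else pvBestUp s a j

lemma pvBestUp_eq_G (s a : List Char) : ∀ j, pvBestUp s a j = ((pvG a j s : Nat) : Int) := by
  intro j
  induction j with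
  | zero => rfl
  | succ j ih =>
    rw [pvBestUp, pvG, Nat.findGreatest_succ]
    by_cases h : a.take (j + 1) <:+ s
    · rw [if_pos ((PySem.Chars.endswith_iff _ _).2 h), if_pos h]
    · rw [if_neg (fun he => h ((PySem.Chars.endswith_iff _ _).1 he)), if_neg h, ih]
      rfl

-- suffix test via the negative slice, for a prefix a.take k with k ≤ a.length
lemma pvSliceEq_iff_suffix (s a : List Char) (k : Nat) (hk1 : 0 < k) (hkn : k ≤ a.length) :
    (s.drop (s.length - k) = a.take k) ↔ (a.take k) <:+ s := by
  constructor
  · intro h; rw [← h]; exact List.drop_suffix _ _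
  · intro h
    have hlen : (a.take k).length = k := by simp; omega
    obtain ⟨t, ht⟩ := h
    rw [← ht, List.length_append, hlen, Nat.add_sub_cancel, List.drop_left]

-- A's loop trims exactly the longest matching adapter prefix
lemma pvTrimLoopA_spec (seq : String) (s a : List Char) (hs : s = seq.toList) :
    ∀ j : Nat, ∀ ad' : String, ad'.toList = a.take j → j ≤ a.length →
      (pvTrimLoopA seq ad').toList = s.take (s.length - (pvBestUp s a j).toNat) := by
  intro j
  induction j with
  | zero =>
    intro ad' had hj
    have hlen : PySem.Str.len ad' = 0 := by simp [PySem.Str.len_eq, had]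
    unfold pvTrimLoopA
    rw [dif_neg (by omega)]
    simp [pvBestUp, hs]
  | succ j ih =>
    intro ad' had hj
    have hlen : PySem.Str.len ad' = ((j + 1 : Nat) : Int) := by
      rw [PySem.Str.len_eq, had, List.length_take]
      congr 1
      omega
    have hpos : 0 < PySem.Str.len ad' := by omega
    have hcondList : (PySem.Str.slice seq (some (-(PySem.Str.len ad'))) none).toList
        = s.drop (s.length - (j + 1)) := by
      rw [hlen, PySem.Str.toList_slice, PySem.Chars.slice_eq_listSlice, ← hs]
      exact PySem.List.slice_from_neg_natCast s (j + 1) (by omega)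
    unfold pvTrimLoopA
    rw [dif_pos hpos]
    by_cases hc : PySem.Str.slice seq (some (-(PySem.Str.len ad'))) none = ad'
    · -- match: A returns seq[:-(j+1)]
      have hdrop : s.drop (s.length - (j + 1)) = a.take (j + 1) := by
        rw [← hcondList, hc, had]
      have hsuf : (a.take (j + 1)) <:+ s :=
        (pvSliceEq_iff_suffix s a (j + 1) (by omega) hj).mp hdrop
      have hend : PySem.Chars.endswith s (a.take (j + 1)) = true :=
        (PySem.Chars.endswith_iff _ _).mpr hsuf
      have hbest : pvBestUp s a (j + 1) = ((j + 1 : Nat) : Int) := by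
        simp [pvBestUp, hend]
      rw [if_pos hc, hbest, hlen]
      rw [PySem.Str.toList_slice, PySem.Chars.slice_eq_listSlice, ← hs]
      rw [PySem.List.slice_to_neg_natCast s (j + 1) (by omega)]
      simp
    · -- no match: recurse on ad[:-1]
      have hnsuf : ¬ (a.take (j + 1)) <:+ s := by
        intro hsuf
        apply hc
        apply String.toList_inj.mp
        rw [hcondList, had]
        exact (pvSliceEq_iff_suffix s a (j + 1) (by omega) hj).mpr hsuf
      have hend : ¬ PySem.Chars.endswith s (a.take (j + 1)) = true := by
        intro h
        exact hnsuf ((PySem.Chars.endswith_iff _ _).mp h)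
      have hbest : pvBestUp s a (j + 1) = pvBestUp s a j := by
        simp [pvBestUp, hend]
      rw [if_neg hc, hbest]
      apply ih
      · rw [PySem.Str.toList_slice, PySem.Chars.slice_eq_listSlice,
            PySem.List.slice_to_neg_one, had]
        rw [List.dropLast_eq_take, List.length_take, List.take_take]
        congr 1
        omega
      · omega

-- ===== VERDICT (by name: the statement is the Claim_ definition above) =====
theorem trim_adapter___spec : Claim_equal_trim_adapter__ := by
  intro seq ad _
  unfold Spec_trim_adapter__
  apply String.toList_inj.mp
  set s := seq.toList with hs
  set a := ad.toList with ha
  have hA : (trim_adapter__ seq ad).toList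
      = s.take (s.length - (pvBestUp s a a.length).toNat) := by
    unfold trim_adapter__
    exact pvTrimLoopA_spec seq s a hs a.length ad (by rw [List.take_length, ha]) le_rfl
  have hAG : (trim_adapter__ seq ad).toList = s.take (s.length - pvG a a.length s) := by
    rw [hA, pvBestUp_eq_G]
    simp
  rcases Nat.eq_zero_or_pos a.length with hm0 | hmpos
  · -- empty adapter: both return seq
    rw [hAG]
    unfold trim_adapter___alt
    rw [← ha, if_pos hm0]
    have : pvG a a.length s = 0 := by rw [hm0]; rfl
    rw [this, ← hs]
    simp
  · rw [hAG]
    unfold trim_adapter___alt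
    rw [← ha, if_neg (by omega)]
    obtain ⟨hfl, hFok⟩ := pvBuild_spec a (a.length - 1) 1 [0] 0 rfl le_rfl hmpos rfl
      (by intro t ht
          simp only [List.length_singleton] at ht
          have h0 : t = 0 := by omega
          subst h0
          rfl) rfl
    have hG0 : (0 : Nat) = pvG a a.length [] := by
      symm
      rw [pvG, Nat.findGreatest_eq_zero_iff]
      intro u hu0 hua hus
      rw [List.suffix_nil] at hus
      have : (a.take u).length = 0 := by rw [hus]; rfl
      simp only [List.length_take] at this
      omega
    have hscan : s.foldl (pvStep a (pvBuildF a 1 [0] 0)) 0 = pvG a a.length s := by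
      have := pvScan_spec a (pvBuildF a 1 [0] 0) hFok hfl s [] 0 hG0
      simpa using this
    show List.take (s.length - pvG a a.length s) s
        = (PySem.Str.slice seq none
            (some (PySem.Str.len seq
              - ((s.foldl (pvStep a (pvBuildF a 1 [0] 0)) 0 : Nat) : Int)))).toList
    rw [hscan]
    have hjs : pvG a a.length s ≤ s.length := by
      have h1 := pvG_suffix a a.length s
      have h2 := h1.length_le
      simp only [List.length_take] at h2
      have := pvG_le a a.length s
      omega
    rw [PySem.Str.toList_slice, PySem.Chars.slice_eq_listSlice, ← hs, PySem.Str.len_eq, ← hs]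
    rw [PySem.List.slice_to s (by omega)]
    congr 1
    omega
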